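-- pv_equiv track=rewrite | github.com/smbursuc/AEA-Graph-Coloring | proiect/recursive_largest_first.py | calculate_conflicts
-- ===== SOURCE A (Python) =====
-- def calculate_conflicts(adjacency_matrix, color_matrix):
--     conflicts = 0
--     num_nodes = len(adjacency_matrix)
--     for i in range(num_nodes):
--         for j in range(i + 1, num_nodes):
--             if adjacency_matrix[i][j] and color_matrix[i] == color_matrix[j]:
--                 conflicts += 1
--     return conflicts
-- ===== SOURCE B (Python) =====
-- def calculate_conflicts(adjacency_matrix, color_matrix):
--     colors = color_matrix[:len(adjacency_matrix)]
--     conflicts = 0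
--     for color in dict.fromkeys(colors):
--         nodes = [i for i, c in enumerate(colors) if c == color]
--         for x in range(len(nodes)):
--             for y in range(x + 1, len(nodes)):
--                 if adjacency_matrix[nodes[x]][nodes[y]]:
--                     conflicts += 1
--     return conflicts
-- ===== Notes on version B (the rewrite author's own statement) =====
-- stated objective: alternative
-- what changed: Instead of testing color equality on every i<j pair, B groups node indices by color (ascending per color) and counts adjacent pairs only within each color group, indexing the matrix as [smaller][larger].
import Mathlib
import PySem

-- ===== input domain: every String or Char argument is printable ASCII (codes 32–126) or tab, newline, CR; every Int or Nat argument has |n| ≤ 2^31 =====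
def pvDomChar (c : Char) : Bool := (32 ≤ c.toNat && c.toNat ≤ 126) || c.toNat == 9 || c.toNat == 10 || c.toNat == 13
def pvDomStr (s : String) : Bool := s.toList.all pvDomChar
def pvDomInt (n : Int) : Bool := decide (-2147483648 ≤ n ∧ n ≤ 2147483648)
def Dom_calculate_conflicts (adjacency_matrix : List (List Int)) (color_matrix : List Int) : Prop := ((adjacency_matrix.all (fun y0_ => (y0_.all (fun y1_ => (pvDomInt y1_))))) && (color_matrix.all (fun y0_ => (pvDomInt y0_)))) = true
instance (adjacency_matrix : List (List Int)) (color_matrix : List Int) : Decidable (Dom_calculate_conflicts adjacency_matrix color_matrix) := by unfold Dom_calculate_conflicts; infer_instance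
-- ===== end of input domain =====

-- B groups node indices by color and counts adjacent pairs only within each color group (alternative decomposition, same exact result).

-- ===== PORT A =====
def calculate_conflicts (adjacency_matrix : List (List Int)) (color_matrix : List Int) : Int :=
  let num_nodes : Int := PySem.List.len adjacency_matrix
  (PySem.List.pyRange 0 num_nodes 1).foldl (fun conflicts i =>
    (PySem.List.pyRange (i + 1) num_nodes 1).foldl (fun conflicts j =>
      if PySem.List.pyGetD (PySem.List.pyGetD adjacency_matrix i []) j 0 ≠ 0 ∧
         PySem.List.pyGetD color_matrix i 0 = PySem.List.pyGetD color_matrix j 0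
      then conflicts + 1 else conflicts) conflicts) 0

-- ===== PORT B =====
def calculate_conflicts_alt (adjacency_matrix : List (List Int)) (color_matrix : List Int) : Int :=
  let colors : List Int :=
    PySem.List.slice color_matrix none (some (PySem.List.len adjacency_matrix))
  (PySem.List.dedup colors).foldl (fun conflicts color =>
    let nodes : List Int :=
      ((PySem.List.enumerate colors).filter (fun p => p.2 == color)).map (·.1)
    (PySem.List.pyRange 0 (PySem.List.len nodes) 1).foldl (fun conflicts x =>
      (PySem.List.pyRange (x + 1) (PySem.List.len nodes) 1).foldl (fun conflicts y =>
        if PySem.List.pyGetD (PySem.List.pyGetD adjacency_matrix (PySem.List.pyGetD nodes x 0) [])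
             (PySem.List.pyGetD nodes y 0) 0 ≠ 0
        then conflicts + 1 else conflicts) conflicts) conflicts) 0

-- ===== PRECONDITION & SPEC =====
-- Pre_ is exactly where Python A returns normally: every row but the last covers all nodes, and
-- no truthy edge points at a node beyond the color list (there A raises IndexError).
def Pre_calculate_conflicts (adjacency_matrix : List (List Int)) (color_matrix : List Int) : Prop :=
  (∀ row ∈ adjacency_matrix.dropLast, adjacency_matrix.length ≤ row.length) ∧
  (∀ j, j < adjacency_matrix.length → color_matrix.length ≤ j → ∀ i, i < j →
    PySem.List.pyGetD (PySem.List.pyGetD adjacency_matrix (i : Int) []) (j : Int) 0 = 0)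
instance (adjacency_matrix : List (List Int)) (color_matrix : List Int) : Decidable (Pre_calculate_conflicts adjacency_matrix color_matrix) := by unfold Pre_calculate_conflicts; infer_instance

def pvWitness_calculate_conflicts : List (List Int) × List Int := ([[0, 1], [1, 0]], [1, 1])

def Spec_calculate_conflicts (adjacency_matrix : List (List Int)) (color_matrix : List Int) (out : Int) : Prop := out = calculate_conflicts_alt adjacency_matrix color_matrix
instance (adjacency_matrix : List (List Int)) (color_matrix : List Int) (out : Int) : Decidable (Spec_calculate_conflicts adjacency_matrix color_matrix out) := by unfold Spec_calculate_conflicts; infer_instance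

-- ===== CLAIM (what is proved, stated in full; the proofs are below) =====
def Claim_equal_calculate_conflicts : Prop := ∀ (adjacency_matrix : List (List Int)) (color_matrix : List Int), Dom_calculate_conflicts adjacency_matrix color_matrix → Pre_calculate_conflicts adjacency_matrix color_matrix → Spec_calculate_conflicts adjacency_matrix color_matrix (calculate_conflicts adjacency_matrix color_matrix)

-- ===== LEMMAS AND PROOFS =====

/-- Number of pairs (x, y) with x before y in `L` satisfying `q x y`. -/
def pairCount {α : Type} (q : α → α → Bool) : List α → Nat
  | [] => 0
  | a :: l => l.countP (q a) + pairCount q l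

theorem pairCount_map {α β : Type} (f : β → α) (q : α → α → Bool) (L : List β) :
    pairCount q (L.map f) = pairCount (fun x y => q (f x) (f y)) L := by
  induction L with
  | nil => rfl
  | cons a l ih => simp [pairCount, ih, List.countP_map, Function.comp_def]

theorem pairCount_congr {α : Type} {q q' : α → α → Bool} {L : List α}
    (h : ∀ x ∈ L, ∀ y ∈ L, q x y = q' x y) : pairCount q L = pairCount q' L := by
  induction L with
  | nil => rfl
  | cons a l ih =>
      simp only [pairCount]
      rw [List.countP_congr (fun y hy => by
          rw [h a (by simp) y (by simp [List.mem_cons, hy])]),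
        ih (fun x hx y hy => h x (by simp [List.mem_cons, hx]) y (by simp [List.mem_cons, hy]))]

/-- The port-shaped nested index loop over `pyRange a b 1` is `pairCount` on that range. -/
theorem foldl_pairs (q : Int → Int → Prop) [inst : ∀ i j, Decidable (q i j)] (a b k : Int) :
    (PySem.List.pyRange a b 1).foldl (fun acc i =>
      (PySem.List.pyRange (i + 1) b 1).foldl (fun acc2 j =>
        if q i j then acc2 + 1 else acc2) acc) k
    = k + pairCount (fun i j => decide (q i j)) (PySem.List.pyRange a b 1) := by
  suffices H : ∀ (n : Nat) (a k : Int), (b - a).toNat = n →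
      (PySem.List.pyRange a b 1).foldl (fun acc i =>
        (PySem.List.pyRange (i + 1) b 1).foldl (fun acc2 j =>
          if q i j then acc2 + 1 else acc2) acc) k
      = k + pairCount (fun i j => decide (q i j)) (PySem.List.pyRange a b 1) from H _ a k rfl
  intro n
  induction n with
  | zero =>
      intro a k h
      rw [PySem.List.pyRange_one_eq_nil (by omega)]
      simp [pairCount]
  | succ n ih =>
      intro a k h
      rw [PySem.List.pyRange_one_cons (by omega : a < b)]
      simp only [List.foldl_cons]
      rw [PySem.List.foldl_ite_add_one]
      rw [ih (a + 1) _ (by omega)]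
      simp only [pairCount]
      push_cast
      ring

/-- For a member of `enumerate`, indexing the list at the first component gives the second. -/
theorem getD_enumerate {L : List Int} {p : Int × Int} (hp : p ∈ PySem.List.enumerate L) :
    PySem.List.pyGetD L p.1 0 = p.2 := by
  rcases (PySem.List.mem_enumerate_iff L 0 p).1 hp with ⟨k, hk, rfl⟩
  simp [PySem.List.pyGetD_natCast, List.getD_eq_getElem?_getD, List.getElem?_eq_getElem hk]

/-- Indexing the full list at a member of the enumerated prefix also gives the second component. -/
theorem getD_take_enumerate {L : List Int} {n : Nat} {p : Int × Int}
    (hp : p ∈ PySem.List.enumerate (L.take n)) : PySem.List.pyGetD L p.1 0 = p.2 := by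
  rcases (PySem.List.mem_enumerate_iff (L.take n) 0 p).1 hp with ⟨k, hk, rfl⟩
  have hkL : k < L.length := lt_of_lt_of_le hk (by simp [List.length_take])
  simp [PySem.List.pyGetD_natCast, List.getD_eq_getElem?_getD, List.getElem?_eq_getElem hkL,
    List.getElem_take]

/-- Index-loop elimination: pairs of indices into `L` are pairs of elements of `L`. -/
theorem pairCount_getD (L : List Int) (u : Int → Int → Bool) :
    pairCount (fun x y => u (PySem.List.pyGetD L x 0) (PySem.List.pyGetD L y 0))
      (PySem.List.pyRange 0 (PySem.List.len L) 1) = pairCount u L := by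
  have h1 : PySem.List.pyRange 0 (PySem.List.len L) 1 = (PySem.List.enumerate L).map (·.1) := by
    rw [PySem.List.map_fst_enumerate]
    simp [PySem.List.len]
  rw [h1, pairCount_map,
    pairCount_congr (fun p hp q hq => by rw [getD_enumerate hp, getD_enumerate hq])]
  conv_rhs => rw [← PySem.List.map_snd_enumerate L 0]
  rw [pairCount_map]

theorem foldl_add_filter (xs : List Int) : ∀ s : List Int,
    xs.foldl PySem.Set.add s = s ++ (PySem.Set.ofList xs).filter (fun y => !s.contains y) := by
  induction xs with
  | nil => intro s; simp [PySem.Set.ofList]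
  | cons a l ih =>
      intro s
      have hofl : PySem.Set.ofList (a :: l)
          = [a] ++ (PySem.Set.ofList l).filter (fun y => !([a] : List Int).contains y) := by
        show (a :: l).foldl PySem.Set.add [] = _
        rw [List.foldl_cons, ih]
        simp [PySem.Set.add, PySem.Set.contains]
      rw [List.foldl_cons, ih, hofl]
      by_cases ha : a ∈ s
      · have hadd : PySem.Set.add s a = s := by simp [PySem.Set.add, PySem.Set.contains, ha]
        rw [hadd]
        simp only [List.filter_append, List.filter_filter]
        have hfa : ([a] : List Int).filter (fun y => !s.contains y) = [] := by
          simp [ha]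
        rw [hfa]
        simp only [List.nil_append, List.append_cancel_left_eq]
        apply List.filter_congr
        intro y _
        by_cases hy : y ∈ s
        · simp [hy]
        · have : y ≠ a := fun h => hy (h ▸ ha)
          simp [hy, this]
      · have hadd : PySem.Set.add s a = s ++ [a] := by
          simp [PySem.Set.add, PySem.Set.contains, ha]
        rw [hadd]
        simp only [List.filter_append, List.filter_filter]
        have hfa : ([a] : List Int).filter (fun y => !s.contains y) = [a] := by
          simp [ha]
        rw [hfa, List.append_assoc]
        simp only [List.append_cancel_left_eq, List.append_cancel_left_eq]
        apply List.filter_congr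
        intro y _
        by_cases hy : y = a <;> simp [hy, Bool.and_comm]
      
theorem dedup_cons {x : Int} {xs : List Int} :
    PySem.List.dedup (x :: xs) = x :: (PySem.List.dedup xs).erase x := by
  have h1 : PySem.List.dedup (x :: xs)
      = [x] ++ (PySem.Set.ofList xs).filter (fun y => !([x] : List Int).contains y) := by
    rw [PySem.List.dedup_eq_ofList]
    show (x :: xs).foldl PySem.Set.add [] = _
    rw [List.foldl_cons, foldl_add_filter]
    simp [PySem.Set.add, PySem.Set.contains]
  rw [h1, (PySem.List.nodup_dedup xs).erase_eq_filter x]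
  rw [PySem.List.dedup_eq_ofList]
  simp only [List.singleton_append, List.cons.injEq, true_and]
  apply List.filter_congr
  intro y _
  rw [Bool.eq_iff_iff]
  simp only [Bool.not_eq_true', List.contains_eq_mem, List.mem_singleton, decide_eq_false_iff_not, bne_iff_ne, ne_eq]

/-- Core partition lemma: same-second-component pairs split by the distinct second components. -/
theorem pairCount_partition (t : Int → Int → Bool) (E : List (Int × Int)) :
    pairCount (fun p q => t p.1 q.1 && (p.2 == q.2)) E
    = ((PySem.List.dedup (E.map (·.2))).map
        (fun c => pairCount (fun p q => t p.1 q.1) (E.filter (fun p => p.2 == c)))).sum := by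
  induction E with
  | nil => simp [pairCount, PySem.List.dedup_eq_ofList, PySem.Set.ofList]
  | cons p l ih =>
      have hbeq : ∀ c q : Int, (c == q) = (q == c) := by
        intro c q
        rw [Bool.eq_iff_iff, beq_iff_eq, beq_iff_eq]
        exact eq_comm
      have hfilter_ne : ∀ c : Int, c ≠ p.2 →
          (p :: l).filter (fun q => q.2 == c) = l.filter (fun q => q.2 == c) := by
        intro c hc
        rw [List.filter_cons_of_neg (by simp [Ne.symm hc])]
      have hfilter_self :
          (p :: l).filter (fun q => q.2 == p.2) = p :: l.filter (fun q => q.2 == p.2) := by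
        rw [List.filter_cons_of_pos (by simp)]
      have hcount : l.countP (fun q => t p.1 q.1 && (p.2 == q.2))
          = (l.filter (fun q => q.2 == p.2)).countP (fun q => t p.1 q.1) := by
        rw [List.countP_filter]
        apply List.countP_congr
        intro q _
        rw [hbeq p.2 q.2]
      simp only [pairCount, List.map_cons, dedup_cons, List.sum_cons, hfilter_self]
      rw [List.map_congr_left (fun c hc => by
        rw [hfilter_ne c (((PySem.List.nodup_dedup (l.map (·.2))).mem_erase_iff.1 hc).1)])]
      rw [ih, hcount]
      by_cases hm : p.2 ∈ l.map (·.2)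
      · have hperm : (PySem.List.dedup (l.map (·.2))).Perm
            (p.2 :: (PySem.List.dedup (l.map (·.2))).erase p.2) :=
          List.perm_cons_erase ((PySem.List.mem_dedup _ _).2 hm)
        rw [(hperm.map _).sum_eq]
        simp only [List.map_cons, List.sum_cons]
        omega
      · have hnil : l.filter (fun q => q.2 == p.2) = [] := by
          rw [List.filter_eq_nil_iff]
          intro q hq hq2
          exact hm (List.mem_map.2 ⟨q, hq, by simpa using hq2⟩)
        rw [List.erase_of_not_mem (fun h => hm ((PySem.List.mem_dedup _ _).1 h))]
        simp [hnil, pairCount]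

-- ===== VERDICT (by name: the statement is the Claim_ definition above) =====
theorem pairCount_append {α : Type} (q : α → α → Bool) (L1 L2 : List α) :
    pairCount q (L1 ++ L2)
    = pairCount q L1 + (L1.map (fun x => L2.countP (q x))).sum + pairCount q L2 := by
  induction L1 with
  | nil => simp [pairCount]
  | cons a l ih => simp [pairCount, ih, List.countP_append]; omega

theorem pairCount_eq_zero {α : Type} {q : α → α → Bool} {L : List α}
    (h : L.Pairwise (fun x y => q x y = false)) : pairCount q L = 0 := by
  induction h with
  | nil => rfl
  | cons ha _ ih =>
      simp only [pairCount, ih, Nat.add_zero, List.countP_eq_zero]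
      intro y hy
      simp [ha y hy]

theorem castSum_map {α : Type} (g : α → Nat) (l : List α) :
    (l.map (fun c => ((g c : Nat) : Int))).sum = ((l.map g).sum : Int) := by
  induction l with
  | nil => simp
  | cons a l ih => simp [ih]

theorem calculate_conflicts_spec : Claim_equal_calculate_conflicts := by
  intro adjacency_matrix color_matrix _ hpre
  obtain ⟨hrows, hedge⟩ := hpre
  show calculate_conflicts adjacency_matrix color_matrix
      = calculate_conflicts_alt adjacency_matrix color_matrix
  -- the clipped color list B iterates over, and its length
  set T : List Int := color_matrix.take adjacency_matrix.length with hTdef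
  have hTslice : PySem.List.slice color_matrix none (some (PySem.List.len adjacency_matrix))
      = T := by
    rw [show PySem.List.len adjacency_matrix = ((adjacency_matrix.length : Nat) : Int) from by
      simp [PySem.List.len], PySem.List.slice_to_natCast]
  have hTlen : T.length = min adjacency_matrix.length color_matrix.length := by
    simp [hTdef]
  have hE : PySem.List.pyRange 0 (PySem.List.len T) 1
      = (PySem.List.enumerate T).map (·.1) := by
    rw [PySem.List.map_fst_enumerate]
    simp [PySem.List.len]
  -- the A-side predicate, on Int indices
  set qA : Int → Int → Bool := fun i j =>
    decide (PySem.List.pyGetD (PySem.List.pyGetD adjacency_matrix i []) j 0 ≠ 0 ∧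
      PySem.List.pyGetD color_matrix i 0 = PySem.List.pyGetD color_matrix j 0) with hqA
  -- edges reaching at or beyond the clipped length do not exist
  have hq0 : ∀ x y : Int, 0 ≤ x → x < y → (T.length : Int) ≤ y →
      y < (adjacency_matrix.length : Int) → qA x y = false := by
    intro x y hx hxy hcy hyn
    have hclen : (color_matrix.length : Int) ≤ y := by omega
    have h0 := hedge y.toNat (by omega) (by omega) x.toNat (by omega)
    rw [Int.toNat_of_nonneg hx, Int.toNat_of_nonneg (by omega : (0:Int) ≤ y)] at h0
    simp [hqA, h0]
  -- the A side as a pairCount over the enumerated clipped color list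
  have hA : calculate_conflicts adjacency_matrix color_matrix
      = (0 : Int) + pairCount
          (fun p q : Int × Int =>
            decide (PySem.List.pyGetD (PySem.List.pyGetD adjacency_matrix p.1 []) q.1 0 ≠ 0)
              && (p.2 == q.2))
          (PySem.List.enumerate T) := by
    simp only [calculate_conflicts]
    rw [foldl_pairs]
    rw [PySem.List.pyRange_one_append 0 (PySem.List.len T)
      (PySem.List.len adjacency_matrix) (by simp [PySem.List.len])
      (by simp only [PySem.List.len]; exact_mod_cast (by omega : T.length ≤ adjacency_matrix.length))]
    rw [pairCount_append]
    have h3 : pairCount qA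
        (PySem.List.pyRange (PySem.List.len T) (PySem.List.len adjacency_matrix) 1)
        = 0 := by
      apply pairCount_eq_zero
      refine (PySem.List.pairwise_lt_pyRange_one _ _).imp_of_mem ?_
      intro x y hxm hym hlt
      rw [PySem.List.mem_pyRange_one] at hxm hym
      simp only [PySem.List.len] at hxm hym
      exact hq0 x y (by omega) hlt (by omega) (by omega)
    have h2 : ((PySem.List.pyRange 0 (PySem.List.len T) 1).map (fun x =>
        (PySem.List.pyRange (PySem.List.len T)
          (PySem.List.len adjacency_matrix) 1).countP (qA x))).sum = 0 := by
      apply List.sum_eq_zero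
      intro z hz
      rcases List.mem_map.1 hz with ⟨x, hx, rfl⟩
      rw [PySem.List.mem_pyRange_one] at hx
      rw [List.countP_eq_zero]
      intro y hy
      rw [PySem.List.mem_pyRange_one] at hy
      simp only [PySem.List.len] at hx hy
      simp [hq0 x y (by omega) (by omega) (by omega) (by omega)]
    rw [h3, h2, hE, pairCount_map]
    simp only [Nat.add_zero]
    congr 1
    apply congrArg
    apply pairCount_congr
    intro p hp q hq
    rw [Bool.eq_iff_iff]
    simp only [decide_eq_true_eq, Bool.and_eq_true, beq_iff_eq, getD_take_enumerate hp,
      getD_take_enumerate hq]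
  -- the B side: each color group contributes its internal adjacent pairs
  have hB : calculate_conflicts_alt adjacency_matrix color_matrix
      = (0 : Int) + ((PySem.List.dedup T).map
          (fun c => ((pairCount
            (fun p q : Int × Int =>
              decide (PySem.List.pyGetD (PySem.List.pyGetD adjacency_matrix p.1 []) q.1 0 ≠ 0))
            ((PySem.List.enumerate T).filter (fun p => p.2 == c)) : Nat) : Int))).sum := by
    simp only [calculate_conflicts_alt, hTslice]
    rw [PySem.List.foldl_congr_mem (g := fun (acc : Int) (c : Int) => acc + ((pairCount
        (fun p q : Int × Int =>
          decide (PySem.List.pyGetD (PySem.List.pyGetD adjacency_matrix p.1 []) q.1 0 ≠ 0))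
        ((PySem.List.enumerate T).filter (fun p => p.2 == c)) : Nat) : Int))]
    · rw [PySem.List.foldl_add]
    · intro acc c _
      rw [foldl_pairs, pairCount_getD (((PySem.List.enumerate T).filter
          (fun p => p.2 == c)).map (·.1))
          (fun i j => decide (PySem.List.pyGetD (PySem.List.pyGetD adjacency_matrix i []) j 0 ≠ 0)),
        pairCount_map]
  rw [hA, hB, pairCount_partition
      (fun i j => decide (PySem.List.pyGetD (PySem.List.pyGetD adjacency_matrix i []) j 0 ≠ 0))
      (PySem.List.enumerate T),
    PySem.List.map_snd_enumerate, castSum_map]
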